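-- pv_equiv track=rewrite | github.com/JCL99/FP_PROJ_2 | proj2.py | conjunto_palavras_para_cadeia
-- ===== SOURCE A (Python) =====
-- def conjunto_palavras_para_cadeia(conjunto_palavras):
--     """
--     conjunto_palavras --> cadeia caracteres
--     """
--     #Ordenar as palavras
--     sorted_lst = sorted(conjunto_palavras)
--     aux_dic = {}
--     aux_str = ""
--
--     #Para cada palavra, se nao estiver no dicionario cria uma chave
--     #com o seu tamanho e adiciona a palavra
--     for i in sorted_lst:
--         if not(str(len(i)) in aux_dic):
--             aux_dic[str(len(i))] = []
--         aux_dic[str(len(i))].append(i)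
--
--     for key in sorted(aux_dic.keys()):
--         aux_str = aux_str + key + "->" + str(aux_dic[key]) + ";"
--
--     aux_str = aux_str[:len(aux_str)-1] #Tira o ultimo ;
--
--     return ("[" + aux_str.replace("'", "") + "]")
-- ===== SOURCE B (Python) =====
-- def conjunto_palavras_para_cadeia(conjunto_palavras):
--     words = sorted(conjunto_palavras)
--     keys = sorted({str(len(w)) for w in words})
--     parts = [k + "->" + str([w for w in words if str(len(w)) == k]) for k in keys]
--     return ("[" + ";".join(parts) + "]").replace("'", "")
-- ===== Notes on version B (the rewrite author's own statement) =====
-- stated objective: simpler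
-- what changed: B drops A's dict-building pass and trailing-semicolon slice: it sorts the distinct length-strings, builds each group by filtering the globally sorted word list, and joins the formatted groups with ';'.
import Mathlib
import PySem

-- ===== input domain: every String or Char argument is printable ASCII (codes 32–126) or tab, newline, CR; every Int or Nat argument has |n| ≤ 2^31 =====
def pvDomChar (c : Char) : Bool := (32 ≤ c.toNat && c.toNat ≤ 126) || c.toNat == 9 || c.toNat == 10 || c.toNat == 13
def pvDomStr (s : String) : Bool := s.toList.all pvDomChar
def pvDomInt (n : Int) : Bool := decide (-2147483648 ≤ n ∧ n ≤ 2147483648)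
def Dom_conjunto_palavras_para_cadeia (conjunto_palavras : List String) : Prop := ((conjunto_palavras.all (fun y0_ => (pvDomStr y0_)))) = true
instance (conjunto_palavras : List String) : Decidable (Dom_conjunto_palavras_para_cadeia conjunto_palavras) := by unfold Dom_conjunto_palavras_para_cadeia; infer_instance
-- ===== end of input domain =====

-- B groups by filtering the sorted word list per sorted distinct length-string and joins with ';',
-- instead of A's dict-building pass plus trailing-semicolon slice; same cost, simpler shape.

-- shared helper: Python's repr(s) for one string (exact on printable ASCII + tab/newline/CR)
def pyEscChar (q : Char) (c : Char) : List Char :=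
  if c = '\\' then ['\\', '\\']
  else if c = Char.ofNat 9 then ['\\', 't']
  else if c = Char.ofNat 10 then ['\\', 'n']
  else if c = Char.ofNat 13 then ['\\', 'r']
  else if c = q then ['\\', q]
  else [c]

def pyReprChars (cs : List Char) : List Char :=
  let q : Char := if cs.contains '\'' && !(cs.contains '"') then '"' else '\''
  q :: cs.flatMap (pyEscChar q) ++ [q]

-- shared helper: Python's str(list_of_strings), as code points
def pyStrListChars (xs : List String) : List Char :=
  '[' :: PySem.Chars.join [',', ' '] (xs.map (fun s => pyReprChars s.toList)) ++ [']']

-- ===== PORT A =====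
def conjunto_palavras_para_cadeia (conjunto_palavras : List String) : String :=
  let sorted_lst := PySem.List.sorted conjunto_palavras (fun x => x) false
  let aux_dic := sorted_lst.foldl (fun d i =>
      let k := PySem.Int.toStr (PySem.Str.len i)
      let d' := if d.contains k then d else d.insert k ([] : List String)
      d'.insert k (d'.getD k [] ++ [i])) PySem.Dict.empty
  let aux_str := (PySem.List.sorted aux_dic.keys (fun x => x) false).foldl
      (fun acc key => acc ++ key.toList ++ ['-', '>'] ++ pyStrListChars (aux_dic.getD key []) ++ [';'])
      ([] : List Char)
  let aux_str2 := PySem.List.slice aux_str none (some ((aux_str.length : Int) - 1))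
  String.ofList ('[' :: PySem.Chars.replace aux_str2 ['\''] [] ++ [']'])

-- ===== PORT B =====
def conjunto_palavras_para_cadeia_alt (conjunto_palavras : List String) : String :=
  let words := PySem.List.sorted conjunto_palavras (fun x => x) false
  let keys := PySem.List.sorted
      (PySem.Set.ofList (words.map (fun w => PySem.Int.toStr (PySem.Str.len w)))) (fun x => x) false
  let parts := keys.map (fun k =>
      k.toList ++ ['-', '>'] ++ pyStrListChars (words.filter (fun w => PySem.Int.toStr (PySem.Str.len w) == k)))
  String.ofList (PySem.Chars.replace ('[' :: PySem.Chars.join [';'] parts ++ [']']) ['\''] [])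

-- ===== PRECONDITION & SPEC =====
def Spec_conjunto_palavras_para_cadeia (conjunto_palavras : List String) (out : String) : Prop := out = conjunto_palavras_para_cadeia_alt conjunto_palavras
instance (conjunto_palavras : List String) (out : String) : Decidable (Spec_conjunto_palavras_para_cadeia conjunto_palavras out) := by unfold Spec_conjunto_palavras_para_cadeia; infer_instance

-- ===== CLAIM (what is proved, stated in full; the proofs are below) =====
def Claim_equal_conjunto_palavras_para_cadeia : Prop := ∀ (conjunto_palavras : List String), Dom_conjunto_palavras_para_cadeia conjunto_palavras → Spec_conjunto_palavras_para_cadeia conjunto_palavras (conjunto_palavras_para_cadeia conjunto_palavras)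

-- ===== LEMMAS AND PROOFS =====

theorem insert_insert_self {κ ν : Type} [BEq κ] [LawfulBEq κ] (d : PySem.Dict κ ν) (k : κ) (v w : ν)
    (h : d.contains k = false) : (d.insert k v).insert k w = d.insert k w := by
  have hany : (d.items.any fun p => p.1 == k) = false := by
    simpa [PySem.Dict.contains] using h
  have hall : ∀ p ∈ d.items, (p.1 == k) = false := by
    simpa [List.any_eq_false] using hany
  have hmap : ∀ u : ν, d.items.map (fun p => if (p.1 == k) = true then (k, u) else p) = d.items := by
    intro u
    calc d.items.map (fun p => if (p.1 == k) = true then (k, u) else p)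
        = d.items.map (fun p => p) := List.map_congr_left (fun p hp => by simp [hall p hp])
      _ = d.items := by simp
  apply PySem.Dict.ext
  simp [PySem.Dict.insert, PySem.Dict.contains, hany, List.any_append, hmap]

theorem stepA_eq_modify (d : PySem.Dict String (List String)) (k i : String) :
    (let d' := if d.contains k then d else d.insert k ([] : List String)
     d'.insert k (d'.getD k [] ++ [i])) = d.modify k [] (· ++ [i]) := by
  simp only [PySem.Dict.modify]
  by_cases h : d.contains k = true
  · simp [h]
  · simp only [Bool.not_eq_true] at h
    simp only [h, Bool.false_eq_true, if_false]
    rw [insert_insert_self _ _ _ _ h, PySem.Dict.getD_insert_self,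
        PySem.Dict.getD_of_not_contains d _ h]

theorem replace_go_singleton (c : Char) : ∀ (fuel : Nat) (l acc : List Char), l.length ≤ fuel →
    PySem.Chars.replace.go [c] [] fuel l acc = acc.reverse ++ l.filter (fun x => x != c) := by
  intro fuel
  induction fuel with
  | zero => intro l acc h
            have : l = [] := List.eq_nil_of_length_eq_zero (Nat.le_zero.mp h)
            subst this; simp [PySem.Chars.replace.go]
  | succ n ih =>
    intro l acc h
    cases l with
    | nil => simp [PySem.Chars.replace.go]
    | cons x t =>
      rw [PySem.Chars.replace.go]
      by_cases hx : c = x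
      · subst hx
        simp only [List.isPrefixOf, BEq.rfl, Bool.and_true, if_true,
          List.drop, List.length, List.reverse_nil, List.nil_append]
        rw [ih t acc (by simpa using h)]
        simp
      · have : ([c].isPrefixOf (x :: t)) = false := by
          simp [List.isPrefixOf]; exact fun hc => absurd (by exact hc) hx
        simp only [this, Bool.false_eq_true, if_false]
        rw [ih t (x :: acc) (by simpa using h)]
        simp [Ne.symm hx]

theorem replace_singleton (cs : List Char) (c : Char) :
    PySem.Chars.replace cs [c] [] = cs.filter (fun x => x != c) := by
  rw [PySem.Chars.replace]
  simp only [List.isEmpty, Bool.false_eq_true, if_false]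
  simpa using replace_go_singleton c cs.length cs [] le_rfl

theorem flatMap_semi (ks : List (List Char)) (h : ks ≠ []) :
    ks.flatMap (fun p => p ++ [';']) = PySem.Chars.join [';'] ks ++ [';'] := by
  induction ks with
  | nil => exact absurd rfl h
  | cons p t ih =>
    cases t with
    | nil => simp [PySem.Chars.join, List.intercalate]
    | cons q r =>
      rw [List.flatMap_cons, ih (by simp), PySem.Chars.join_cons_cons]
      simp [PySem.Chars.join]

theorem slice_len_sub_one (cs : List Char) :
    PySem.List.slice cs none (some ((cs.length : Int) - 1)) = cs.dropLast := by
  cases cs with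
  | nil => simpa using PySem.List.slice_to_neg_one ([] : List Char)
  | cons x t =>
    have h : ((x :: t).length : Int) - 1 = ((t.length : Nat) : Int) := by simp
    rw [h, PySem.List.slice_to_natCast]
    simp [List.dropLast_eq_take]

theorem dic_keys (W : List String) :
    (List.foldl (fun d i => d.modify (PySem.Int.toStr (PySem.Str.len i)) [] fun l => l ++ [i])
      PySem.Dict.empty W).keys
    = PySem.Set.ofList (W.map (fun w => PySem.Int.toStr (PySem.Str.len w))) := by
  rw [← List.foldl_map (f := fun i => (PySem.Int.toStr (PySem.Str.len i), i))
      (g := fun d p => PySem.Dict.modify d p.1 [] fun l => l ++ [p.2])]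
  refine (PySem.Dict.keys_foldl_modify_key (List.map (fun i => (PySem.Int.toStr (PySem.Str.len i), i)) W)
      Prod.fst ([] : List String) (fun _ p l => l ++ [p.2]) PySem.Dict.empty).trans ?_
  simp [PySem.Dict.keys_empty, PySem.Set.update_nil_left, List.map_map, Function.comp_def]

theorem dic_getD (W : List String) (k : String) :
    (List.foldl (fun d i => d.modify (PySem.Int.toStr (PySem.Str.len i)) [] fun l => l ++ [i])
      PySem.Dict.empty W).getD k []
    = W.filter (fun w => PySem.Int.toStr (PySem.Str.len w) == k) := by
  rw [← List.foldl_map (f := fun i => (PySem.Int.toStr (PySem.Str.len i), i))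
      (g := fun d p => PySem.Dict.modify d p.1 [] fun l => l ++ [p.2])]
  refine (PySem.Dict.getD_foldl_modify_append
      (List.map (fun i => (PySem.Int.toStr (PySem.Str.len i), i)) W) PySem.Dict.empty k).trans ?_
  simp [List.filter_map, List.map_map, Function.comp_def]

theorem fmt_lemma (KS : List String) (F : String → List String) :
    String.ofList ('[' :: PySem.Chars.replace
        (PySem.List.slice
          (List.foldl (fun acc key => acc ++ (key.toList ++ (['-', '>'] ++ (pyStrListChars (F key) ++ [';'])))) [] KS)
          none
          (some (((List.foldl (fun acc key => acc ++ (key.toList ++ (['-', '>'] ++ (pyStrListChars (F key) ++ [';'])))) [] KS).length : Int) - 1)))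
        ['\''] [] ++ [']'])
    = String.ofList (PySem.Chars.replace
        ('[' :: PySem.Chars.join [';'] (KS.map (fun k => k.toList ++ (['-', '>'] ++ pyStrListChars (F k)))) ++ [']'])
        ['\''] []) := by
  rw [PySem.List.foldl_append_eq_flatMap]
  rw [slice_len_sub_one]
  by_cases h : KS = []
  · subst h
    simp [PySem.Chars.join_nil, replace_singleton]
  · have hsemi := flatMap_semi (KS.map (fun k => k.toList ++ (['-', '>'] ++ pyStrListChars (F k))))
      (by simpa using h)
    rw [List.flatMap_map] at hsemi
    simp only [List.append_assoc] at hsemi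
    simp only [List.nil_append]
    rw [hsemi, List.dropLast_concat]
    simp [replace_singleton, List.filter_append]

theorem main_chars (xs : List String) :
    conjunto_palavras_para_cadeia xs = conjunto_palavras_para_cadeia_alt xs := by
  unfold conjunto_palavras_para_cadeia conjunto_palavras_para_cadeia_alt
  have hb : (fun (d : PySem.Dict String (List String)) (i : String) =>
      let k := PySem.Int.toStr (PySem.Str.len i)
      let d' := if d.contains k then d else d.insert k ([] : List String)
      d'.insert k (d'.getD k [] ++ [i]))
      = fun d i => d.modify (PySem.Int.toStr (PySem.Str.len i)) [] (fun l => l ++ [i]) :=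
    funext fun d => funext fun i => stepA_eq_modify d (PySem.Int.toStr (PySem.Str.len i)) i
  rw [hb]
  simp only [dic_keys, dic_getD, List.append_assoc]
  exact fmt_lemma
    (PySem.List.sorted
      (PySem.Set.ofList
        (List.map (fun w => PySem.Int.toStr (PySem.Str.len w)) (PySem.List.sorted xs (fun x => x) false)))
      (fun x => x) false)
    (fun k => List.filter (fun w => PySem.Int.toStr (PySem.Str.len w) == k) (PySem.List.sorted xs (fun x => x) false))

-- ===== VERDICT (by name: the statement is the Claim_ definition above) =====
theorem conjunto_palavras_para_cadeia_spec : Claim_equal_conjunto_palavras_para_cadeia := by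
  intro xs _
  exact main_chars xs
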